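-- pv_equiv track=rewrite | github.com/Pandonline/ADVENT_OF_CODE_2023 | Day13/mirrors.py | findSymetrie
-- ===== SOURCE A (Python) =====
-- def verifSymetrieLine(MAP,l1,l2,start,smudge):
--     if  l1 < 0 or  l2 >= len(MAP):
--         if not smudge == 0:
--             return 0
--         return start
--     for j in range(len(MAP[0])):
--         if not MAP[l1][j] == MAP[l2][j]:
--             if smudge > 0:
--                 smudge -= 1
--             else:
--                 return 0
--     return verifSymetrieLine(MAP,l1-1,l2+1,start,smudge)
--
-- def verifSymetrieCol(MAP,c1,c2,start,smudge):
--     if  c1 < 0 or  c2 >= len(MAP[0]):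
--         if not smudge == 0:
--             return 0
--         return start
--     for i in range(len(MAP)):
--         if not MAP[i][c1] == MAP[i][c2]:
--             if smudge > 0:
--                 smudge -= 1
--             else:
--                 return 0
--     return verifSymetrieCol(MAP,c1-1,c2+1,start,smudge)
--
-- def findSymetrie(MAP):
--     nbLine = 0
--     nbColonne = 0
--     for i in range(len(MAP)-1):
--         nbLine += verifSymetrieLine(MAP,i,i+1,i+1,1)
--     for j in range(len(MAP[0])-1):
--         nbColonne += verifSymetrieCol(MAP,j,j+1,j+1,1)
--     return 100*nbLine+nbColonne
-- ===== SOURCE B (Python) =====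
-- def _hamming(a, b):
--     return sum(1 for x, y in zip(a, b) if x != y)
--
-- def _transpose(g):
--     if not g:
--         return []
--     m = min(len(r) for r in g)
--     return [[r[j] for r in g] for j in range(m)]
--
-- def _score(g):
--     n = len(g)
--     total = 0
--     for i in range(n - 1):
--         mism = sum(_hamming(g[i - k], g[i + 1 + k])
--                    for k in range(min(i + 1, n - 1 - i)))
--         if mism == 1:
--             total += i + 1
--     return total
--
-- def findSymetrie(MAP):
--     w = len(MAP[0])
--     grid = [list(r)[:w] for r in MAP]
--     return 100 * _score(grid) + _score(_transpose(grid))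
-- ===== Notes on version B (the rewrite author's own statement) =====
-- stated objective: simpler
-- what changed: A tests each candidate axis by a budgeted recursion over mirrored row/column pairs with early 'return 0' exits and a separate near-duplicate function for columns; B counts the total number of mismatched cells per axis with one comprehension and tests it against 1, and handles columns by transposing the grid and reusing the same scorer.
-- outside the precondition, e.g. on findSymetrie(['aaba', 'aaab', 'abba', 'baa']): A returns 0, B returns 2
import Mathlib
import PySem

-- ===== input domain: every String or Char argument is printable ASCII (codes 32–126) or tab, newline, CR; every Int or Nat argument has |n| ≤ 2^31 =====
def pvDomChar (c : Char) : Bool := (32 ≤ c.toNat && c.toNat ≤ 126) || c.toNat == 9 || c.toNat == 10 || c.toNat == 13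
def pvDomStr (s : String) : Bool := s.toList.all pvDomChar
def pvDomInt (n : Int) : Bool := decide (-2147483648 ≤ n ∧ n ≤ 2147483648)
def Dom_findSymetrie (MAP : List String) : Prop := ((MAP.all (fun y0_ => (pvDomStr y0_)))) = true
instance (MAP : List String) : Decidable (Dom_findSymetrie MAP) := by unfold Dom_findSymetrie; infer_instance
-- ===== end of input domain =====

-- B re-groups the computation: per candidate axis it counts ALL mismatched cells and tests the
-- count against 1, and handles columns by transposing the grid and reusing the same scorer —
-- a simpler decomposition than A's budgeted recursion with early exits (objective: simpler).

-- ===== PORT A =====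
-- MAP[l1][j] (both indices Python-style); none where Python raises IndexError
def pvGetc (MAP : List String) (i j : Int) : Option Char :=
  (PySem.List.pyGet? MAP i).bind (fun s => PySem.Str.pyGet? s j)

-- len(MAP[0]) — total stand-in; exact whenever MAP ≠ [] (Pre_ guarantees it)
def pvLen0 (MAP : List String) : Nat := (MAP.headD "").toList.length

-- the 'for j in range(len(MAP[0]))' loop of verifSymetrieLine: some s = fall through with
-- remaining smudge s, none = early 'return 0'
def pvLineLoop (MAP : List String) (l1 l2 : Int) (js : List Nat) (smudge : Int) : Option Int :=
  match js with
  | [] => some smudge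
  | j :: rest =>
    if pvGetc MAP l1 (j : Int) != pvGetc MAP l2 (j : Int) then
      if smudge > 0 then pvLineLoop MAP l1 l2 rest (smudge - 1) else none
    else pvLineLoop MAP l1 l2 rest smudge

def verifSymetrieLine (MAP : List String) (l1 l2 start smudge : Int) : Int :=
  if l1 < 0 ∨ l2 ≥ (MAP.length : Int) then
    if ¬ smudge = 0 then 0 else start
  else
    match pvLineLoop MAP l1 l2 (List.range (pvLen0 MAP)) smudge with
    | none => 0
    | some s => verifSymetrieLine MAP (l1 - 1) (l2 + 1) start s
  termination_by (l1 + 1).toNat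
  decreasing_by simp at *; omega

-- the 'for i in range(len(MAP))' loop of verifSymetrieCol
def pvColLoop (MAP : List String) (c1 c2 : Int) (is_ : List Nat) (smudge : Int) : Option Int :=
  match is_ with
  | [] => some smudge
  | i :: rest =>
    if pvGetc MAP (i : Int) c1 != pvGetc MAP (i : Int) c2 then
      if smudge > 0 then pvColLoop MAP c1 c2 rest (smudge - 1) else none
    else pvColLoop MAP c1 c2 rest smudge

def verifSymetrieCol (MAP : List String) (c1 c2 start smudge : Int) : Int :=
  if c1 < 0 ∨ c2 ≥ (pvLen0 MAP : Int) then
    if ¬ smudge = 0 then 0 else start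
  else
    match pvColLoop MAP c1 c2 (List.range MAP.length) smudge with
    | none => 0
    | some s => verifSymetrieCol MAP (c1 - 1) (c2 + 1) start s
  termination_by (c1 + 1).toNat
  decreasing_by simp at *; omega

def findSymetrie (MAP : List String) : Int :=
  let nbLine : Int :=
    (List.range (MAP.length - 1)).foldl
      (fun (acc : Int) (i : Nat) =>
        acc + verifSymetrieLine MAP (i : Int) ((i : Int) + 1) ((i : Int) + 1) 1) 0
  let nbColonne : Int :=
    (List.range (pvLen0 MAP - 1)).foldl
      (fun (acc : Int) (j : Nat) =>
        acc + verifSymetrieCol MAP (j : Int) ((j : Int) + 1) ((j : Int) + 1) 1) 0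
  100 * nbLine + nbColonne

-- ===== PORT B =====
-- sum(1 for x, y in zip(a, b) if x != y)
def pvHamming (a b : List Char) : Int :=
  (((a.zip b).filter (fun p => p.1 != p.2)).length : Int)

-- min(len(r) for r in g), g nonempty
def pvMinLen (g : List (List Char)) : Nat :=
  match g with
  | [] => 0
  | r :: rest => rest.foldl (fun m r' => min m r'.length) r.length

-- [[r[j] for r in g] for j in range(m)]  (r[j] is in range since j < m = min length)
def pvTranspose (g : List (List Char)) : List (List Char) :=
  match g with
  | [] => []
  | _ :: _ => (List.range (pvMinLen g)).map (fun j => g.map (fun r => r.getD j ' '))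

-- sum(_hamming(g[i-k], g[i+1+k]) for k in range(min(i+1, n-1-i)))
def pvAxisMism (g : List (List Char)) (i : Nat) : Int :=
  (List.range (min (i + 1) (g.length - 1 - i))).foldl
    (fun acc k => acc + pvHamming (g.getD (i - k) []) (g.getD (i + 1 + k) [])) 0

def pvScore (g : List (List Char)) : Int :=
  (List.range (g.length - 1)).foldl
    (fun acc i => if pvAxisMism g i = 1 then acc + ((i : Int) + 1) else acc) 0

def findSymetrie_alt (MAP : List String) : Int :=
  let w := (MAP.headD "").toList.length
  let grid := MAP.map (fun r => r.toList.take w)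
  100 * pvScore grid + pvScore (pvTranspose grid)

-- ===== PRECONDITION & SPEC =====
-- Pre_ restricts to nonempty grids in which every row is at least as wide as row 0 (the puzzle's
-- rectangular input shape): on empty MAP, and on grids containing a row shorter than row 0,
-- A raises IndexError (except when an early two-mismatch exit happens to return first).
def Pre_findSymetrie (MAP : List String) : Prop :=
  MAP ≠ [] ∧ ∀ s ∈ MAP, (MAP.headD "").toList.length ≤ s.toList.length
instance (MAP : List String) : Decidable (Pre_findSymetrie MAP) := by
  unfold Pre_findSymetrie; infer_instance

def pvWitness_findSymetrie : List String := ["#.#", "#..", "#.#", "#.#"]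

def Spec_findSymetrie (MAP : List String) (out : Int) : Prop := out = findSymetrie_alt MAP
instance (MAP : List String) (out : Int) : Decidable (Spec_findSymetrie MAP out) := by
  unfold Spec_findSymetrie; infer_instance

-- ===== CLAIM (what is proved, stated in full; the proofs are below) =====
def Claim_equal_findSymetrie : Prop := ∀ (MAP : List String), Dom_findSymetrie MAP → Pre_findSymetrie MAP → Spec_findSymetrie MAP (findSymetrie MAP)

-- ===== LEMMAS AND PROOFS =====

-- number of mirrored-pair mismatches A's line loop sees for the row pair (l1, l2)
def pvCntRow (MAP : List String) (l1 l2 : Int) : Int :=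
  ((List.range (pvLen0 MAP)).countP
    (fun (j : Nat) => pvGetc MAP l1 (j : Int) != pvGetc MAP l2 (j : Int)) : Nat)

def pvCntCol (MAP : List String) (c1 c2 : Int) : Int :=
  ((List.range MAP.length).countP
    (fun (i : Nat) => pvGetc MAP (i : Int) c1 != pvGetc MAP (i : Int) c2) : Nat)

-- total mismatch count over the whole reflection chain starting at rows (l1, l2)
def pvChainL (MAP : List String) (l1 l2 : Int) : Int :=
  if l1 < 0 ∨ l2 ≥ (MAP.length : Int) then 0
  else pvCntRow MAP l1 l2 + pvChainL MAP (l1 - 1) (l2 + 1)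
  termination_by (l1 + 1).toNat
  decreasing_by simp at *; omega

def pvChainC (MAP : List String) (c1 c2 : Int) : Int :=
  if c1 < 0 ∨ c2 ≥ (pvLen0 MAP : Int) then 0
  else pvCntCol MAP c1 c2 + pvChainC MAP (c1 - 1) (c2 + 1)
  termination_by (c1 + 1).toNat
  decreasing_by simp at *; omega

lemma pvCntRow_nonneg (MAP : List String) (l1 l2 : Int) : 0 ≤ pvCntRow MAP l1 l2 := by
  unfold pvCntRow; positivity

lemma pvCntCol_nonneg (MAP : List String) (c1 c2 : Int) : 0 ≤ pvCntCol MAP c1 c2 := by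
  unfold pvCntCol; positivity

lemma pvChainL_nonneg (MAP : List String) (l1 l2 : Int) : 0 ≤ pvChainL MAP l1 l2 := by
  suffices h : ∀ (k : Nat) (l1 l2 : Int), (l1 + 1).toNat ≤ k → 0 ≤ pvChainL MAP l1 l2 from
    h (l1 + 1).toNat l1 l2 le_rfl
  intro k
  induction k with
  | zero =>
    intro l1 l2 hk
    rw [pvChainL]
    simp [show l1 < 0 by omega]
  | succ k ih =>
    intro l1 l2 hk
    rw [pvChainL]
    split_ifs with h
    · exact le_rfl
    · rcases not_or.mp h with ⟨h1, _⟩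
      exact add_nonneg (pvCntRow_nonneg MAP l1 l2) (ih (l1 - 1) (l2 + 1) (by omega))

lemma pvChainC_nonneg (MAP : List String) (c1 c2 : Int) : 0 ≤ pvChainC MAP c1 c2 := by
  suffices h : ∀ (k : Nat) (c1 c2 : Int), (c1 + 1).toNat ≤ k → 0 ≤ pvChainC MAP c1 c2 from
    h (c1 + 1).toNat c1 c2 le_rfl
  intro k
  induction k with
  | zero =>
    intro c1 c2 hk
    rw [pvChainC]
    simp [show c1 < 0 by omega]
  | succ k ih =>
    intro c1 c2 hk
    rw [pvChainC]
    split_ifs with h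
    · exact le_rfl
    · rcases not_or.mp h with ⟨h1, _⟩
      exact add_nonneg (pvCntCol_nonneg MAP c1 c2) (ih (c1 - 1) (c2 + 1) (by omega))

lemma pvLineLoop_char (MAP : List String) (l1 l2 : Int) (js : List Nat) :
    ∀ s : Int, 0 ≤ s →
      pvLineLoop MAP l1 l2 js s =
        (if ((js.countP (fun (j : Nat) => pvGetc MAP l1 (j : Int) != pvGetc MAP l2 (j : Int)) : Nat) : Int) ≤ s
         then some (s - ((js.countP (fun (j : Nat) => pvGetc MAP l1 (j : Int) != pvGetc MAP l2 (j : Int)) : Nat) : Int))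
         else none) := by
  induction js with
  | nil => intro s hs; simp [pvLineLoop, hs]
  | cons j rest ih =>
    intro s hs
    rw [pvLineLoop]
    simp only [List.countP_cons]
    by_cases hp : (pvGetc MAP l1 (j : Int) != pvGetc MAP l2 (j : Int)) = true
    · simp only [hp, if_pos]
      by_cases h0 : s > 0
      · simp only [h0, if_pos]
        rw [ih (s - 1) (by omega)]
        push_cast
        split_ifs with h1 h2 h2 <;>
          first
            | exact congrArg some (by omega)
            | rfl
            | (exfalso; omega)
      · simp only [h0, if_false]
        split_ifs with h1
        · exfalso; push_cast at h1; omega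
        · rfl
    · simp only [Bool.not_eq_true] at hp
      rw [ih s hs]
      simp [hp]

lemma pvColLoop_char (MAP : List String) (c1 c2 : Int) (is_ : List Nat) :
    ∀ s : Int, 0 ≤ s →
      pvColLoop MAP c1 c2 is_ s =
        (if ((is_.countP (fun (i : Nat) => pvGetc MAP (i : Int) c1 != pvGetc MAP (i : Int) c2) : Nat) : Int) ≤ s
         then some (s - ((is_.countP (fun (i : Nat) => pvGetc MAP (i : Int) c1 != pvGetc MAP (i : Int) c2) : Nat) : Int))
         else none) := by
  induction is_ with
  | nil => intro s hs; simp [pvColLoop, hs]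
  | cons i rest ih =>
    intro s hs
    rw [pvColLoop]
    simp only [List.countP_cons]
    by_cases hp : (pvGetc MAP (i : Int) c1 != pvGetc MAP (i : Int) c2) = true
    · simp only [hp, if_pos]
      by_cases h0 : s > 0
      · simp only [h0, if_pos]
        rw [ih (s - 1) (by omega)]
        push_cast
        split_ifs with h1 h2 h2 <;>
          first
            | exact congrArg some (by omega)
            | rfl
            | (exfalso; omega)
      · simp only [h0, if_false]
        split_ifs with h1
        · exfalso; push_cast at h1; omega
        · rfl
    · simp only [Bool.not_eq_true] at hp
      rw [ih s hs]
      simp [hp]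

lemma verifSymetrieLine_char (MAP : List String) (start : Int) :
    ∀ (k : Nat) (l1 l2 s : Int), (l1 + 1).toNat ≤ k → 0 ≤ s →
      verifSymetrieLine MAP l1 l2 start s =
        (if pvChainL MAP l1 l2 = s then start else 0) := by
  intro k
  induction k with
  | zero =>
    intro l1 l2 s hk hs
    have hneg : l1 < 0 ∨ l2 ≥ (MAP.length : Int) := Or.inl (by omega)
    rw [verifSymetrieLine, pvChainL, if_pos hneg, if_pos hneg]
    split_ifs <;> omega
  | succ k ih =>
    intro l1 l2 s hk hs
    rw [verifSymetrieLine, pvChainL]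
    by_cases hb : l1 < 0 ∨ l2 ≥ (MAP.length : Int)
    · rw [if_pos hb, if_pos hb]
      split_ifs <;> omega
    · rw [if_neg hb, if_neg hb]
      rcases not_or.mp hb with ⟨h1, h2⟩
      rw [pvLineLoop_char MAP l1 l2 _ s hs]
      have hr : pvCntRow MAP l1 l2 =
          ((List.range (pvLen0 MAP)).countP
            (fun (j : Nat) => pvGetc MAP l1 (j : Int) != pvGetc MAP l2 (j : Int)) : Nat) := rfl
      have hnn := pvChainL_nonneg MAP (l1 - 1) (l2 + 1)
      rw [← hr]
      by_cases hc : pvCntRow MAP l1 l2 ≤ s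
      · rw [if_pos hc]
        show verifSymetrieLine MAP (l1 - 1) (l2 + 1) start _ = _
        rw [ih (l1 - 1) (l2 + 1) _ (by omega) (by omega)]
        split_ifs <;> omega
      · rw [if_neg hc]
        show (0 : Int) = _
        split_ifs with d1
        · exfalso; omega
        · rfl

lemma verifSymetrieCol_char (MAP : List String) (start : Int) :
    ∀ (k : Nat) (c1 c2 s : Int), (c1 + 1).toNat ≤ k → 0 ≤ s →
      verifSymetrieCol MAP c1 c2 start s =
        (if pvChainC MAP c1 c2 = s then start else 0) := by
  intro k
  induction k with
  | zero =>
    intro c1 c2 s hk hs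
    have hneg : c1 < 0 ∨ c2 ≥ (pvLen0 MAP : Int) := Or.inl (by omega)
    rw [verifSymetrieCol, pvChainC, if_pos hneg, if_pos hneg]
    split_ifs <;> omega
  | succ k ih =>
    intro c1 c2 s hk hs
    rw [verifSymetrieCol, pvChainC]
    by_cases hb : c1 < 0 ∨ c2 ≥ (pvLen0 MAP : Int)
    · rw [if_pos hb, if_pos hb]
      split_ifs <;> omega
    · rw [if_neg hb, if_neg hb]
      rcases not_or.mp hb with ⟨h1, h2⟩
      rw [pvColLoop_char MAP c1 c2 _ s hs]
      have hr : pvCntCol MAP c1 c2 =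
          ((List.range MAP.length).countP
            (fun (i : Nat) => pvGetc MAP (i : Int) c1 != pvGetc MAP (i : Int) c2) : Nat) := rfl
      have hnn := pvChainC_nonneg MAP (c1 - 1) (c2 + 1)
      rw [← hr]
      by_cases hc : pvCntCol MAP c1 c2 ≤ s
      · rw [if_pos hc]
        show verifSymetrieCol MAP (c1 - 1) (c2 + 1) start _ = _
        rw [ih (c1 - 1) (c2 + 1) _ (by omega) (by omega)]
        split_ifs <;> omega
      · rw [if_neg hc]
        show (0 : Int) = _
        split_ifs with d1
        · exfalso; omega
        · rfl

lemma pvChainL_eq_sum (MAP : List String) :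
    ∀ (K : Nat) (l1 l2 : Int), K = min (l1 + 1).toNat ((MAP.length : Int) - l2).toNat →
      pvChainL MAP l1 l2 =
        ((List.range K).map (fun (t : Nat) => pvCntRow MAP (l1 - (t : Int)) (l2 + (t : Int)))).sum := by
  intro K
  induction K with
  | zero =>
    intro l1 l2 hK
    have hb : l1 < 0 ∨ l2 ≥ (MAP.length : Int) := by omega
    rw [pvChainL, if_pos hb]
    simp
  | succ K ih =>
    intro l1 l2 hK
    have hb : ¬(l1 < 0 ∨ l2 ≥ (MAP.length : Int)) := by omega
    rw [pvChainL, if_neg hb]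
    rw [List.range_succ_eq_map]
    simp only [List.map_cons, List.map_map, List.sum_cons, Nat.cast_zero, sub_zero, add_zero]
    congr 1
    rw [ih (l1 - 1) (l2 + 1) (by omega)]
    apply congrArg List.sum
    apply List.map_congr_left
    intro t ht
    simp only [Function.comp_apply]
    congr 1 <;> push_cast <;> ring

lemma pvChainC_eq_sum (MAP : List String) :
    ∀ (K : Nat) (c1 c2 : Int), K = min (c1 + 1).toNat ((pvLen0 MAP : Int) - c2).toNat →
      pvChainC MAP c1 c2 =
        ((List.range K).map (fun (t : Nat) => pvCntCol MAP (c1 - (t : Int)) (c2 + (t : Int)))).sum := by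
  intro K
  induction K with
  | zero =>
    intro c1 c2 hK
    have hb : c1 < 0 ∨ c2 ≥ (pvLen0 MAP : Int) := by omega
    rw [pvChainC, if_pos hb]
    simp
  | succ K ih =>
    intro c1 c2 hK
    have hb : ¬(c1 < 0 ∨ c2 ≥ (pvLen0 MAP : Int)) := by omega
    rw [pvChainC, if_neg hb]
    rw [List.range_succ_eq_map]
    simp only [List.map_cons, List.map_map, List.sum_cons, Nat.cast_zero, sub_zero, add_zero]
    congr 1
    rw [ih (c1 - 1) (c2 + 1) (by omega)]
    apply congrArg List.sum
    apply List.map_congr_left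
    intro t ht
    simp only [Function.comp_apply]
    congr 1 <;> push_cast <;> ring

lemma pvHamming_eq_countP :
    ∀ (u v : List Char), u.length = v.length →
      pvHamming u v =
        (((List.range u.length).countP (fun (j : Nat) => u.getD j ' ' != v.getD j ' ')) : Nat) := by
  intro u
  induction u with
  | nil => intro v hv; simp [pvHamming]
  | cons x u ih =>
    intro v hv
    cases v with
    | nil => simp at hv
    | cons y v =>
      simp only [List.length_cons] at hv
      have hv' : u.length = v.length := by omega
      have hstep : pvHamming (x :: u) (y :: v) =
          (if x != y then 1 else 0) + pvHamming u v := by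
        simp only [pvHamming, List.zip_cons_cons, List.filter_cons]
        by_cases hxy : (x != y) = true
        · simp [hxy]; ring
        · simp [hxy]
      rw [hstep, ih v hv']
      rw [List.length_cons, List.range_succ_eq_map]
      rw [List.countP_cons, List.countP_map]
      have hfun : ((fun (j : Nat) => (x :: u).getD j ' ' != (y :: v).getD j ' ') ∘ Nat.succ)
          = (fun (j : Nat) => u.getD j ' ' != v.getD j ' ') := by
        funext j; simp
      rw [hfun]
      by_cases hxy : (x != y) = true
      · simp [hxy]; ring
      · simp [hxy]

lemma pvGetc_eq (MAP : List String) (a j : Nat) (ha : a < MAP.length)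
    (hj : j < (MAP.getD a "").toList.length) :
    pvGetc MAP (a : Int) (j : Int) = some ((MAP.getD a "").toList.getD j ' ') := by
  unfold pvGetc
  rw [PySem.List.pyGet?_natCast]
  rw [List.getElem?_eq_getElem ha]
  simp only [Option.bind_some, PySem.Str.pyGet?_natCast]
  rw [List.getD_eq_getElem _ _ ha] at hj ⊢
  rw [List.getElem?_eq_getElem hj, List.getD_eq_getElem _ _ hj]

lemma pvFoldlMin_const : ∀ (l : List (List Char)) (m : Nat), (∀ x ∈ l, x.length = m) →
    l.foldl (fun acc r => min acc r.length) m = m := by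
  intro l
  induction l with
  | nil => intro m _; rfl
  | cons r l ih =>
    intro m h
    have hr : r.length = m := h r (by simp)
    simp only [List.foldl_cons, hr, min_self]
    exact ih m (fun x hx => h x (by simp [hx]))

lemma pvGrid_getD (MAP : List String) (a : Nat) (ha : a < MAP.length) :
    (MAP.map (fun r => r.toList.take (pvLen0 MAP))).getD a []
      = (MAP.getD a "").toList.take (pvLen0 MAP) := by
  rw [List.getD_eq_getElem _ _ (by simpa using ha), List.getElem_map,
    List.getD_eq_getElem _ _ ha]

lemma pvRow_mem (MAP : List String) (a : Nat) (ha : a < MAP.length) :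
    MAP.getD a "" ∈ MAP := by
  rw [List.getD_eq_getElem _ _ ha]; exact List.getElem_mem ha

lemma pvTake_getD (l : List Char) (w j : Nat) (hw : w ≤ l.length) (hj : j < w) :
    (l.take w).getD j ' ' = l.getD j ' ' := by
  rw [List.getD_eq_getElem _ _ (by rw [List.length_take]; omega),
    List.getD_eq_getElem _ _ (by omega)]
  exact List.getElem_take

lemma pvCntRow_eq (MAP : List String)
    (hlen : ∀ s ∈ MAP, pvLen0 MAP ≤ s.toList.length)
    (a b : Nat) (ha : a < MAP.length) (hb : b < MAP.length) :
    pvCntRow MAP (a : Int) (b : Int) =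
      pvHamming ((MAP.getD a "").toList.take (pvLen0 MAP))
                ((MAP.getD b "").toList.take (pvLen0 MAP)) := by
  have hwa : pvLen0 MAP ≤ (MAP.getD a "").toList.length := hlen _ (pvRow_mem MAP a ha)
  have hwb : pvLen0 MAP ≤ (MAP.getD b "").toList.length := hlen _ (pvRow_mem MAP b hb)
  have hla : ((MAP.getD a "").toList.take (pvLen0 MAP)).length = pvLen0 MAP := by
    rw [List.length_take]; exact Nat.min_eq_left hwa
  have hlb : ((MAP.getD b "").toList.take (pvLen0 MAP)).length = pvLen0 MAP := by
    rw [List.length_take]; exact Nat.min_eq_left hwb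
  rw [pvHamming_eq_countP _ _ (by rw [hla, hlb]), hla]
  unfold pvCntRow
  norm_cast
  apply List.countP_congr
  intro j hj
  simp only [List.mem_range] at hj
  rw [pvGetc_eq MAP a j ha (lt_of_lt_of_le hj hwa), pvGetc_eq MAP b j hb (lt_of_lt_of_le hj hwb)]
  rw [pvTake_getD _ _ _ hwa hj, pvTake_getD _ _ _ hwb hj]
  simp

lemma pvChainL_eq_axis (MAP : List String)
    (hlen : ∀ s ∈ MAP, pvLen0 MAP ≤ s.toList.length)
    (i : Nat) (_hi : i < MAP.length - 1) :
    pvChainL MAP (i : Int) ((i : Int) + 1)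
      = pvAxisMism (MAP.map (fun r => r.toList.take (pvLen0 MAP))) i := by
  have hgl : (MAP.map (fun r => r.toList.take (pvLen0 MAP))).length = MAP.length := by simp
  rw [pvChainL_eq_sum MAP
    (min (i + 1) ((MAP.map (fun r => r.toList.take (pvLen0 MAP))).length - 1 - i))
    (i : Int) ((i : Int) + 1) (by rw [hgl]; omega)]
  unfold pvAxisMism
  rw [PySem.List.foldl_add, zero_add]
  apply congrArg List.sum
  apply List.map_congr_left
  intro t ht
  simp only [List.mem_range, hgl] at ht
  have h1 : (i : Int) - (t : Int) = ((i - t : Nat) : Int) := by omega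
  have h2 : (i : Int) + 1 + (t : Int) = ((i + 1 + t : Nat) : Int) := by push_cast; ring
  rw [h1, h2]
  rw [pvCntRow_eq MAP hlen (i - t) (i + 1 + t) (by omega) (by omega)]
  rw [pvGrid_getD MAP (i - t) (by omega), pvGrid_getD MAP (i + 1 + t) (by omega)]

lemma pvMinLen_grid (MAP : List String) (hne : MAP ≠ [])
    (hlen : ∀ s ∈ MAP, pvLen0 MAP ≤ s.toList.length) :
    pvMinLen (MAP.map (fun r => r.toList.take (pvLen0 MAP))) = pvLen0 MAP := by
  cases MAP with
  | nil => exact absurd rfl hne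
  | cons s rest =>
    have hw : pvLen0 (s :: rest) = s.toList.length := rfl
    simp only [List.map_cons, pvMinLen]
    rw [show (s.toList.take (pvLen0 (s :: rest))).length = pvLen0 (s :: rest) by
      simp [hw]]
    apply pvFoldlMin_const
    intro x hx
    obtain ⟨r, hr, rfl⟩ := List.mem_map.mp hx
    have := hlen r (by simp [hr])
    rw [List.length_take]; exact Nat.min_eq_left this

lemma pvTg_length (MAP : List String) (hne : MAP ≠ [])
    (hlen : ∀ s ∈ MAP, pvLen0 MAP ≤ s.toList.length) :
    (pvTranspose (MAP.map (fun r => r.toList.take (pvLen0 MAP)))).length = pvLen0 MAP := by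
  cases MAP with
  | nil => exact absurd rfl hne
  | cons s rest =>
    rw [show (((s :: rest).map (fun r => r.toList.take (pvLen0 (s :: rest))))) =
      (s.toList.take (pvLen0 (s :: rest))) ::
        (rest.map (fun r => r.toList.take (pvLen0 (s :: rest)))) from by simp]
    rw [pvTranspose]
    rw [List.length_map, List.length_range]
    rw [show ((s.toList.take (pvLen0 (s :: rest))) ::
        (rest.map (fun r => r.toList.take (pvLen0 (s :: rest))))) =
      ((s :: rest).map (fun r => r.toList.take (pvLen0 (s :: rest)))) from by simp]
    exact pvMinLen_grid (s :: rest) hne hlen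

lemma pvTg_getD (MAP : List String) (hne : MAP ≠ [])
    (hlen : ∀ s ∈ MAP, pvLen0 MAP ≤ s.toList.length)
    (c : Nat) (hc : c < pvLen0 MAP) :
    (pvTranspose (MAP.map (fun r => r.toList.take (pvLen0 MAP)))).getD c []
      = MAP.map (fun s => (s.toList.take (pvLen0 MAP)).getD c ' ') := by
  cases MAP with
  | nil => exact absurd rfl hne
  | cons s rest =>
    have hm := pvMinLen_grid (s :: rest) hne hlen
    rw [show (((s :: rest).map (fun r => r.toList.take (pvLen0 (s :: rest))))) =
      (s.toList.take (pvLen0 (s :: rest))) ::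
        (rest.map (fun r => r.toList.take (pvLen0 (s :: rest)))) from by simp]
    rw [pvTranspose]
    rw [show ((s.toList.take (pvLen0 (s :: rest))) ::
        (rest.map (fun r => r.toList.take (pvLen0 (s :: rest))))) =
      ((s :: rest).map (fun r => r.toList.take (pvLen0 (s :: rest)))) from by simp]
    rw [hm]
    rw [List.getD_eq_getElem _ _ (by simpa using hc), List.getElem_map, List.getElem_range]
    rw [List.map_map]
    rfl

lemma pvCntCol_eq (MAP : List String) (hne : MAP ≠ [])
    (hlen : ∀ s ∈ MAP, pvLen0 MAP ≤ s.toList.length)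
    (c1 c2 : Nat) (h1 : c1 < pvLen0 MAP) (h2 : c2 < pvLen0 MAP) :
    pvCntCol MAP (c1 : Int) (c2 : Int) =
      pvHamming
        ((pvTranspose (MAP.map (fun r => r.toList.take (pvLen0 MAP)))).getD c1 [])
        ((pvTranspose (MAP.map (fun r => r.toList.take (pvLen0 MAP)))).getD c2 []) := by
  rw [pvTg_getD MAP hne hlen c1 h1, pvTg_getD MAP hne hlen c2 h2]
  rw [pvHamming_eq_countP _ _ (by simp)]
  rw [List.length_map]
  unfold pvCntCol
  norm_cast
  apply List.countP_congr
  intro i hi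
  simp only [List.mem_range] at hi
  have hwa : pvLen0 MAP ≤ (MAP.getD i "").toList.length := hlen _ (pvRow_mem MAP i hi)
  rw [pvGetc_eq MAP i c1 hi (lt_of_lt_of_le h1 hwa), pvGetc_eq MAP i c2 hi (lt_of_lt_of_le h2 hwa)]
  have hga : ∀ c : Nat, c < pvLen0 MAP →
      (MAP.map (fun s => (s.toList.take (pvLen0 MAP)).getD c ' ')).getD i ' '
        = (MAP.getD i "").toList.getD c ' ' := by
    intro c hcw
    rw [List.getD_eq_getElem _ _ (by simpa using hi), List.getElem_map,
      ← List.getD_eq_getElem MAP _ hi]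
    exact pvTake_getD _ _ _ hwa hcw
  rw [hga c1 h1, hga c2 h2]
  simp

lemma pvChainC_eq_axis (MAP : List String) (hne : MAP ≠ [])
    (hlen : ∀ s ∈ MAP, pvLen0 MAP ≤ s.toList.length)
    (c : Nat) (_hc : c < pvLen0 MAP - 1) :
    pvChainC MAP (c : Int) ((c : Int) + 1)
      = pvAxisMism (pvTranspose (MAP.map (fun r => r.toList.take (pvLen0 MAP)))) c := by
  have htl := pvTg_length MAP hne hlen
  rw [pvChainC_eq_sum MAP
    (min (c + 1) ((pvTranspose (MAP.map (fun r => r.toList.take (pvLen0 MAP)))).length - 1 - c))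
    (c : Int) ((c : Int) + 1) (by rw [htl]; omega)]
  unfold pvAxisMism
  rw [PySem.List.foldl_add, zero_add]
  apply congrArg List.sum
  apply List.map_congr_left
  intro t ht
  simp only [List.mem_range, htl] at ht
  have h1 : (c : Int) - (t : Int) = ((c - t : Nat) : Int) := by omega
  have h2 : (c : Int) + 1 + (t : Int) = ((c + 1 + t : Nat) : Int) := by push_cast; ring
  rw [h1, h2]
  exact pvCntCol_eq MAP hne hlen (c - t) (c + 1 + t) (by omega) (by omega)

-- ===== VERDICT (by name: the statement is the Claim_ definition above) =====
theorem findSymetrie_spec : Claim_equal_findSymetrie := by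
  intro MAP _ hPre
  obtain ⟨hne, hlen0⟩ := hPre
  have hlen : ∀ s ∈ MAP, pvLen0 MAP ≤ s.toList.length := hlen0
  unfold Spec_findSymetrie findSymetrie findSymetrie_alt
  have hgl : (MAP.map (fun r => r.toList.take (pvLen0 MAP))).length = MAP.length := by simp
  have htl := pvTg_length MAP hne hlen
  dsimp only
  rw [show (MAP.headD "").toList.length = pvLen0 MAP from rfl]
  congr 1
  · congr 1
    unfold pvScore
    rw [hgl]
    apply PySem.List.foldl_congr_mem'
    intro i hi acc
    simp only [List.mem_range] at hi
    rw [verifSymetrieLine_char MAP ((i : Int) + 1) (i + 1) (i : Int) ((i : Int) + 1) 1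
      (by omega) (by omega)]
    rw [pvChainL_eq_axis MAP hlen i hi]
    by_cases H : pvAxisMism (MAP.map (fun r => r.toList.take (pvLen0 MAP))) i = 1 <;>
      simp [H]
  · unfold pvScore
    rw [htl]
    apply PySem.List.foldl_congr_mem'
    intro c hc acc
    simp only [List.mem_range] at hc
    rw [verifSymetrieCol_char MAP ((c : Int) + 1) (c + 1) (c : Int) ((c : Int) + 1) 1
      (by omega) (by omega)]
    rw [pvChainC_eq_axis MAP hne hlen c hc]
    by_cases H : pvAxisMism (pvTranspose (MAP.map (fun r => r.toList.take (pvLen0 MAP)))) c = 1 <;>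
      simp [H]
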